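-- pv_equiv track=rewrite | github.com/MagicHack/Advent-of-Code | 2021/day15/main.py | generate_p2_map
-- ===== SOURCE A (Python) =====
-- def generate_p2_map(data):
--     new_map = []
--
--     for row in data:
--         new_row = row[:]
--         for i in range(4):
--             for x in row:
--                 new_val = x + i + 1
--                 if new_val > 9:
--                     new_val -= 9
--                 new_row.append(new_val)
--         new_map.append(new_row)
--
--     new_new_map = []
--     for r in new_map:
--         new_new_map.append(r[:])
--     for i in range(4):
--         for row in new_map:
--             new_row = []
--             for x in row:
--                 new_val = x + i + 1
--                 if new_val > 9:
--                     new_val -= 9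
--                 new_row.append(new_val)
--             new_new_map.append(new_row)
--     return new_new_map
-- ===== SOURCE B (Python) =====
-- def generate_p2_map(data):
--     def bump(v, inc):
--         if inc == 0:
--             return v
--         v += inc
--         return v - 9 if v > 9 else v
--
--     return [
--         [bump(bump(x, tc), tr) for tc in range(5) for x in row]
--         for tr in range(5)
--         for row in data
--     ]
-- ===== Notes on version B (the rewrite author's own statement) =====
-- stated objective: simpler
-- what changed: B builds the full 5x5 tiled grid in one nested comprehension (tile_row, row, tile_col, cell) with a single bump helper, instead of A's two-phase horizontal-then-vertical expansion with an intermediate horizontally-expanded map.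
import Mathlib
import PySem

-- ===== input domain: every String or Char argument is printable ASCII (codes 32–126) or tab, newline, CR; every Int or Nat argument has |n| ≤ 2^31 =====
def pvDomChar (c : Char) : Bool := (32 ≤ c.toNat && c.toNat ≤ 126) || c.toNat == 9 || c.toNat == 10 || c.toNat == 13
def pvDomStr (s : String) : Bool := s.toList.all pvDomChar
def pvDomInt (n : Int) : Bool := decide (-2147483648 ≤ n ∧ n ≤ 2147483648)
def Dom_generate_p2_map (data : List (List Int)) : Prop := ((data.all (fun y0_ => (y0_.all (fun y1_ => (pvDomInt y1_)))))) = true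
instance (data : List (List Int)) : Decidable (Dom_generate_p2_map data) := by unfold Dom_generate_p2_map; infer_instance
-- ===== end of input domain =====

-- B builds the tiled map in one pass (tile_row, row, tile_col, cell) instead of A's two-phase expansion; same output, proved equal.

-- ===== PORT A =====
def generate_p2_map (data : List (List Int)) : List (List Int) :=
  -- phase 1: horizontally expand each row (new_map)
  let new_map := data.foldl (fun new_map row =>
    let new_row := (PySem.List.pyRange 0 4 1).foldl (fun new_row i =>
      row.foldl (fun new_row x =>
        let new_val := x + i + 1
        let new_val := if new_val > 9 then new_val - 9 else new_val
        new_row ++ [new_val]) new_row) row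
    new_map ++ [new_row]) []
  -- phase 2: copy, then append 4 vertically incremented copies
  let new_new_map := new_map.foldl (fun acc r => acc ++ [r]) []
  (PySem.List.pyRange 0 4 1).foldl (fun acc i =>
    new_map.foldl (fun acc row =>
      let new_row := row.foldl (fun new_row x =>
        let new_val := x + i + 1
        let new_val := if new_val > 9 then new_val - 9 else new_val
        new_row ++ [new_val]) []
      acc ++ [new_row]) acc) new_new_map

-- ===== PORT B =====
def pvBump (v inc : Int) : Int :=
  if inc == 0 then v
  else if v + inc > 9 then v + inc - 9 else v + inc

def generate_p2_map_alt (data : List (List Int)) : List (List Int) :=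
  (List.range 5).flatMap (fun tr =>
    data.map (fun row =>
      (List.range 5).flatMap (fun tc =>
        row.map (fun x => pvBump (pvBump x (tc : Int)) (tr : Int)))))

-- ===== PRECONDITION & SPEC =====
def Spec_generate_p2_map (data : List (List Int)) (out : List (List Int)) : Prop := out = generate_p2_map_alt data
instance (data : List (List Int)) (out : List (List Int)) : Decidable (Spec_generate_p2_map data out) := by unfold Spec_generate_p2_map; infer_instance

-- ===== CLAIM (what is proved, stated in full; the proofs are below) =====
def Claim_equal_generate_p2_map : Prop := ∀ (data : List (List Int)), Dom_generate_p2_map data → Spec_generate_p2_map data (generate_p2_map data)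

-- ===== LEMMAS AND PROOFS =====

-- ===== VERDICT (by name: the statement is the Claim_ definition above) =====
theorem generate_p2_map_spec : Claim_equal_generate_p2_map := by
  intro data _
  unfold Spec_generate_p2_map generate_p2_map generate_p2_map_alt
  have hrange : PySem.List.pyRange 0 4 1 = [0,1,2,3] := by decide
  have h5 : List.range 5 = [0,1,2,3,4] := by decide
  simp only [hrange, h5, List.foldl_cons, List.foldl_nil,
    PySem.List.foldl_append_singleton_eq_map, List.flatMap_cons, List.flatMap_nil, List.map_map, List.nil_append,
    List.append_nil]
  have hb0 : ∀ y : Int, pvBump y 0 = y := fun y => by simp [pvBump]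
  have h1 : ∀ x : Int, (if x + 0 + 1 > 9 then x + 0 + 1 - 9 else x + 0 + 1) = pvBump x 1 := by
    intro x; simp only [pvBump]; norm_num
  have h2 : ∀ x : Int, (if x + 1 + 1 > 9 then x + 1 + 1 - 9 else x + 1 + 1) = pvBump x 2 := by
    intro x; simp only [pvBump]; norm_num; split_ifs <;> omega
  have h3 : ∀ x : Int, (if x + 2 + 1 > 9 then x + 2 + 1 - 9 else x + 2 + 1) = pvBump x 3 := by
    intro x; simp only [pvBump]; norm_num; split_ifs <;> omega
  have h4 : ∀ x : Int, (if x + 3 + 1 > 9 then x + 3 + 1 - 9 else x + 3 + 1) = pvBump x 4 := by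
    intro x; simp only [pvBump]; norm_num; split_ifs <;> omega
  simp only [Function.comp_def, h1, h2, h3, h4, List.map_append, List.map_map,
    List.append_assoc, Nat.cast_zero, Nat.cast_one, Nat.cast_ofNat, hb0, List.map_id']
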